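-- pv_equiv track=rewrite | github.com/methanius/cpp_magnetometer | old_python/python/magnetometry/misc/lia_bimodal_emission-ClausNM--laptop.py | rev_vec
-- ===== SOURCE A (Python) =====
-- def rev_vec(v):
--     u = []
--     for i in range(0, len(v)):
--         u.append(0)
--
--     j = len(u) - 1
--     for i in range(0, len(v)):
--         u[j] = v[i]
--         j -= 1
--
--     return u
-- ===== SOURCE B (Python) =====
-- def rev_vec(v):
--     u = list(v)
--     lo = 0
--     hi = len(u) - 1
--     while lo < hi:
--         u[lo], u[hi] = u[hi], u[lo]
--         lo += 1
--         hi -= 1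
--     return u
-- ===== Notes on version B (the rewrite author's own statement) =====
-- stated objective: alternative
-- what changed: B copies the input once and reverses it in place with a converging two-pointer swap, instead of A's pre-filling a zero list and writing into it by a separately maintained descending index.
import Mathlib
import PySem

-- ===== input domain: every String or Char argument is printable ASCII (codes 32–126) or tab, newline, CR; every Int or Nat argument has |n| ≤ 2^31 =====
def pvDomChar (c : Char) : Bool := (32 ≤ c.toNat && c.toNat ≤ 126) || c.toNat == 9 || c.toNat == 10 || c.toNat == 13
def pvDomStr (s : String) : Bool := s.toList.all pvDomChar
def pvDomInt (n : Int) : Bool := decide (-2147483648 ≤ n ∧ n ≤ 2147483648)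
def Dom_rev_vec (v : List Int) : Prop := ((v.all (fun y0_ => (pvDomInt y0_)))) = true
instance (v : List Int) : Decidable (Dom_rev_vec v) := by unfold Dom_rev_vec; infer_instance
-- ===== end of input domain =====

-- B reverses a copy of the input in place with a two-pointer swap instead of A's
-- zero-prefilled output array written by a descending index; return values agree on all inputs.

-- ===== PORT A =====
-- u = []; for i in range(len(v)): u.append(0)
-- j = len(u)-1; for i in range(len(v)): u[j] = v[i]; j -= 1
def rev_vec (v : List Int) : List Int :=
  let u : List Int := (List.range v.length).foldl (fun u _ => u ++ [0]) []
  let r := (List.range v.length).foldl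
    (fun (p : List Int × Nat) i => (p.1.set p.2 (v.getD i 0), p.2 - 1))
    (u, u.length - 1)
  r.1

-- ===== PORT B =====
-- while lo < hi: swap u[lo], u[hi]; lo += 1; hi -= 1
def revSwapGo (u : List Int) (lo hi : Nat) : List Int :=
  if lo < hi then
    revSwapGo ((u.set lo (u.getD hi 0)).set hi (u.getD lo 0)) (lo + 1) (hi - 1)
  else u
termination_by hi - lo

def rev_vec_alt (v : List Int) : List Int :=
  -- u = list(v) is the identity copy on an immutable list
  revSwapGo v 0 (v.length - 1)

-- ===== PRECONDITION & SPEC =====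
def Spec_rev_vec (v : List Int) (out : List Int) : Prop := out = rev_vec_alt v
instance (v : List Int) (out : List Int) : Decidable (Spec_rev_vec v out) := by unfold Spec_rev_vec; infer_instance

-- ===== CLAIM (what is proved, stated in full; the proofs are below) =====
def Claim_equal_rev_vec : Prop := ∀ (v : List Int), Dom_rev_vec v → Spec_rev_vec v (rev_vec v)

-- ===== LEMMAS AND PROOFS =====

theorem zeros_fold (n : Nat) :
    (List.range n).foldl (fun (u : List Int) _ => u ++ [0]) [] = List.replicate n 0 := by
  induction n with
  | zero => rfl
  | succ n ih =>
      rw [List.range_succ, List.foldl_append, ih]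
      simp [List.replicate_succ']

theorem A_fold (v : List Int) (n : Nat) (u : List Int) (L : Nat)
    (hL : u.length = L) (hn : n ≤ L) (hnv : n ≤ v.length) :
    ((List.range n).foldl
      (fun (p : List Int × Nat) i => (p.1.set p.2 (v.getD i 0), p.2 - 1))
      (u, L - 1)).1.length = L ∧
    ((List.range n).foldl
      (fun (p : List Int × Nat) i => (p.1.set p.2 (v.getD i 0), p.2 - 1))
      (u, L - 1)).2 = L - 1 - n ∧
    ∀ k, ((List.range n).foldl
      (fun (p : List Int × Nat) i => (p.1.set p.2 (v.getD i 0), p.2 - 1))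
      (u, L - 1)).1[k]? = if L - n ≤ k ∧ k < L then v[L - 1 - k]? else u[k]? := by
  induction n with
  | zero =>
      refine ⟨hL, by simp, ?_⟩
      intro k
      have : ¬ (L - 0 ≤ k ∧ k < L) := by omega
      simp
  | succ n ih =>
      obtain ⟨ih1, ih2, ih3⟩ := ih (by omega) (by omega)
      rw [List.range_succ, List.foldl_append]
      set r := (List.range n).foldl
        (fun (p : List Int × Nat) i => (p.1.set p.2 (v.getD i 0), p.2 - 1))
        (u, L - 1) with hr
      simp only [List.foldl_cons, List.foldl_nil]
      refine ⟨by simp [ih1], by simp [ih2]; omega, ?_⟩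
      intro k
      rw [List.getElem?_set]
      rcases Nat.lt_or_ge k L with hk | hk
      · by_cases he : r.2 = k
        · have hkv : k = L - 1 - n := by omega
          have hn' : n < v.length := by omega
          have : L - (n + 1) ≤ k ∧ k < L := by omega
          simp only [he, ih1, this]
          have : L - 1 - k = n := by omega
          rw [this, List.getElem?_eq_getElem hn', List.getD_eq_getElem v 0 hn']
          simp
        · rw [if_neg he, ih3 k]
          have hne : k ≠ L - 1 - n := by rw [ih2] at he; omega
          split_ifs with h1 h2 <;> first | rfl | omega
      · have he : r.2 ≠ k := by omega
        rw [if_neg he, ih3 k]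
        split_ifs with h1 h2 <;> first | rfl | omega

theorem rev_vec_eq_reverse (v : List Int) : rev_vec v = v.reverse := by
  unfold rev_vec
  have hz := zeros_fold v.length
  simp only [hz, List.length_replicate]
  obtain ⟨h1, _, h3⟩ := A_fold v v.length (List.replicate v.length 0) v.length
    (by simp) le_rfl le_rfl
  apply List.ext_getElem?
  intro k
  rw [h3 k]
  rcases Nat.lt_or_ge k v.length with hk | hk
  · have hc : v.length - v.length ≤ k ∧ k < v.length := by omega
    rw [if_pos hc, List.getElem?_reverse hk]
  · have hc : ¬ (v.length - v.length ≤ k ∧ k < v.length) := by omega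
    rw [if_neg hc, List.getElem?_eq_none (by simpa using hk),
        List.getElem?_eq_none (by simp; omega)]

theorem B_go (u : List Int) (lo hi : Nat) (hhi : hi < u.length) :
    (revSwapGo u lo hi).length = u.length ∧
    ∀ k, (revSwapGo u lo hi)[k]? =
      if lo ≤ k ∧ k ≤ hi then u[lo + hi - k]? else u[k]? := by
  by_cases h : lo < hi
  · have hlo : lo < u.length := by omega
    set u' := (u.set lo (u.getD hi 0)).set hi (u.getD lo 0) with hu'
    have hlen' : u'.length = u.length := by simp [hu']
    have hgu' : ∀ k, u'[k]? =
        if k = lo then u[hi]? else if k = hi then u[lo]? else u[k]? := by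
      intro k
      by_cases k2 : k = hi
      · rw [k2, hu', List.getElem?_set_self (by simp [hhi]),
            if_neg (by omega : ¬ (hi = lo)), if_pos rfl,
            List.getD_eq_getElem u 0 hlo, List.getElem?_eq_getElem hlo]
      · by_cases k1 : k = lo
        · rw [k1, hu', List.getElem?_set_ne (by omega : hi ≠ lo),
              List.getElem?_set_self hlo,
              if_pos rfl, List.getD_eq_getElem u 0 hhi, List.getElem?_eq_getElem hhi]
        · rw [hu', List.getElem?_set_ne (Ne.symm k2), List.getElem?_set_ne (Ne.symm k1),
              if_neg k1, if_neg k2]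
    have ihrec := B_go u' (lo + 1) (hi - 1) (by omega)
    obtain ⟨ih1, ih2⟩ := ihrec
    rw [revSwapGo, if_pos h]
    refine ⟨by rw [ih1, hlen'], ?_⟩
    intro k
    rw [ih2 k]
    by_cases hc : lo + 1 ≤ k ∧ k ≤ hi - 1
    · have hidx : lo + 1 + (hi - 1) - k = lo + hi - k := by omega
      rw [if_pos hc, hidx, hgu']
      have h1 : ¬ (lo + hi - k = lo) := by omega
      have h2 : ¬ (lo + hi - k = hi) := by omega
      have hc' : lo ≤ k ∧ k ≤ hi := by omega
      rw [if_neg h1, if_neg h2, if_pos hc']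
    · rw [if_neg hc, hgu']
      by_cases k1 : k = lo
      · have hc' : lo ≤ k ∧ k ≤ hi := by omega
        have hidx : lo + hi - k = hi := by omega
        rw [if_pos k1, if_pos hc', hidx]
      · by_cases k2 : k = hi
        · have hc' : lo ≤ k ∧ k ≤ hi := by omega
          have hidx : lo + hi - k = lo := by omega
          rw [if_neg k1, if_pos k2, if_pos hc', hidx]
        · have hc' : ¬ (lo ≤ k ∧ k ≤ hi) := by omega
          rw [if_neg k1, if_neg k2, if_neg hc']
  · rw [revSwapGo, if_neg h]
    refine ⟨rfl, ?_⟩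
    intro k
    by_cases hc : lo ≤ k ∧ k ≤ hi
    · have : lo + hi - k = k := by omega
      rw [if_pos hc, this]
    · rw [if_neg hc]
termination_by hi - lo

theorem rev_vec_alt_eq_reverse (v : List Int) : rev_vec_alt v = v.reverse := by
  unfold rev_vec_alt
  cases v with
  | nil => rw [revSwapGo]; rfl
  | cons a t =>
      set v := a :: t with hv
      have hL : 0 < v.length := by simp [hv]
      obtain ⟨_, h2⟩ := B_go v 0 (v.length - 1) (by omega)
      apply List.ext_getElem?
      intro k
      rw [h2 k]
      rcases Nat.lt_or_ge k v.length with hk | hk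
      · have hc : 0 ≤ k ∧ k ≤ v.length - 1 := by omega
        have : 0 + (v.length - 1) - k = v.length - 1 - k := by omega
        rw [if_pos hc, this, List.getElem?_reverse hk]
      · have hc : ¬ (0 ≤ k ∧ k ≤ v.length - 1) := by omega
        rw [if_neg hc, List.getElem?_eq_none (by simpa using hk),
            List.getElem?_eq_none (by simp; omega)]

-- ===== VERDICT (by name: the statement is the Claim_ definition above) =====
theorem rev_vec_spec : Claim_equal_rev_vec := by
  intro v _
  unfold Spec_rev_vec
  rw [rev_vec_eq_reverse, rev_vec_alt_eq_reverse]
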